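-- pv_equiv track=rewrite | github.com/mk668a/python_aoj | paiza/alg2/rand_a.py | RAND1
-- ===== SOURCE A (Python) =====
-- def RAND1(n):
--     x = 53402397
--     rand_seq = []
--     for i in range(n):
--         x = 65539 * x + 125654
--         if x < 0:
--             x += 2147483647
--             x += 1
--         rand_seq.append(x)
--     return rand_seq
-- ===== SOURCE B (Python) =====
-- def RAND1(n):
--     # Closed form of the affine recurrence: x_k = a^k * seed + c * (a^k - 1)/(a - 1),
--     # where (a^k - 1)/(a - 1) is the exact geometric sum 1 + a + ... + a^(k-1).
--     a, c, seed = 65539, 125654, 53402397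
--     return [(p := pow(a, k)) * seed + c * ((p - 1) // (a - 1)) for k in range(1, n + 1)]
-- ===== Notes on version B (the rewrite author's own statement) =====
-- stated objective: alternative
-- what changed: Replaces the sequential loop that mutates state x (with a dead x<0 branch) by the closed-form solution of the affine recurrence: each element k is computed independently as a^k*seed + c*(a^k-1)/(a-1) using pow and the exact geometric sum.
import Mathlib
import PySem

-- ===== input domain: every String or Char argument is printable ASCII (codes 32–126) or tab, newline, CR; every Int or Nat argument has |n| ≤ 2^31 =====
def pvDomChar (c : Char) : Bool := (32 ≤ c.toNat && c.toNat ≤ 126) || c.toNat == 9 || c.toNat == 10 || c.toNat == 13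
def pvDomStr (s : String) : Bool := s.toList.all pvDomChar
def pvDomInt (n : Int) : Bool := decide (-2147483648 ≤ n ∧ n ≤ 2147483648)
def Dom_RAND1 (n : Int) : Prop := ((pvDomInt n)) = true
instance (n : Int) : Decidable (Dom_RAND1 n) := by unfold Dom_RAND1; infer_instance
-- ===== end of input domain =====

-- B replaces A's sequential state-mutating loop (with its x<0 branch) by the closed-form
-- solution of the affine recurrence, computing each element independently (objective: alternative).

-- ===== PORT A =====
-- the loop: x updated, patched if negative, appended; one step per range element
def RAND1go (x : Int) (l : List Int) : List Int :=
  match l with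
  | [] => []
  | _ :: t =>
    let x1 := 65539 * x + 125654
    let x2 := if x1 < 0 then x1 + 2147483647 + 1 else x1
    x2 :: RAND1go x2 t

def RAND1 (n : Int) : List Int :=
  RAND1go 53402397 (PySem.List.pyRange 0 n 1)

-- ===== PORT B =====
-- [(p := pow(a,k)) * seed + c*((p-1)//(a-1)) for k in range(1, n+1)]; k ≥ 1 so k.toNat is exact
def RAND1_alt (n : Int) : List Int :=
  (PySem.List.pyRange 1 (n + 1) 1).map (fun k =>
    let p : Int := 65539 ^ k.toNat
    p * 53402397 + 125654 * PySem.Int.floordiv (p - 1) (65539 - 1))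

-- ===== PRECONDITION & SPEC =====
def Spec_RAND1 (n : Int) (out : List Int) : Prop := out = RAND1_alt n
instance (n : Int) (out : List Int) : Decidable (Spec_RAND1 n out) := by unfold Spec_RAND1; infer_instance

-- ===== CLAIM (what is proved, stated in full; the proofs are below) =====
def Claim_equal_RAND1 : Prop := ∀ (n : Int), Dom_RAND1 n → Spec_RAND1 n (RAND1 n)

-- ===== LEMMAS AND PROOFS =====

-- the geometric sum 1 + a + … + a^(k-1), the exact value of (a^k - 1)/(a - 1)
def pvGeom (k : Nat) : Int := ∑ i ∈ Finset.range k, 65539 ^ i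

-- the closed-form value of A's state after k steps
def pvG (k : Nat) : Int := 65539 ^ k * 53402397 + 125654 * pvGeom k

theorem pvGeom_nonneg (k : Nat) : 0 ≤ pvGeom k :=
  Finset.sum_nonneg fun i _ => pow_nonneg (by norm_num) i

theorem pvG_nonneg (k : Nat) : 0 ≤ pvG k := by
  have h1 : (0:Int) ≤ 65539 ^ k := pow_nonneg (by norm_num) k
  have h2 := pvGeom_nonneg k
  unfold pvG; nlinarith

theorem pvGeom_succ (k : Nat) : pvGeom (k + 1) = 65539 * pvGeom k + 1 := by
  unfold pvGeom
  rw [Finset.sum_range_succ']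
  simp only [pow_succ]
  rw [← Finset.sum_mul]
  ring

theorem pvG_succ (k : Nat) : pvG (k + 1) = 65539 * pvG k + 125654 := by
  unfold pvG
  rw [pvGeom_succ, pow_succ]
  ring

theorem geom_mul (k : Nat) : (65539:Int) ^ k - 1 = 65538 * pvGeom k := by
  induction k with
  | zero => simp [pvGeom]
  | succ m ih =>
    rw [pvGeom_succ, pow_succ]
    nlinarith [ih]

theorem floordiv_geom (k : Nat) :
    PySem.Int.floordiv ((65539:Int) ^ k - 1) (65539 - 1) = pvGeom k := by
  rw [geom_mul, PySem.Int.floordiv_eq_ediv_of_pos (by norm_num)]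
  norm_num

-- A's loop from state pvG j over any m-element list yields pvG (j+1), …, pvG (j+m)
theorem RAND1go_closed (l : List Int) (j : Nat) :
    RAND1go (pvG j) l = (List.range l.length).map (fun i => pvG (j + 1 + i)) := by
  induction l generalizing j with
  | nil => simp [RAND1go]
  | cons b t ih =>
    have hstep : 65539 * pvG j + 125654 = pvG (j + 1) := (pvG_succ j).symm
    have hneg : ¬ pvG (j + 1) < 0 := not_lt.mpr (pvG_nonneg (j + 1))
    simp only [RAND1go, hstep, List.length_cons,
      List.range_succ_eq_map, List.map_cons, List.map_map]
    rw [if_neg hneg, ih (j + 1)]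
    refine List.cons_eq_cons.mpr ⟨by simp, ?_⟩
    apply List.map_congr_left
    intro i _
    simp only [Function.comp]
    congr 1
    omega

-- ===== VERDICT (by name: the statement is the Claim_ definition above) =====
theorem RAND1_spec : Claim_equal_RAND1 := by
  intro n _
  unfold Spec_RAND1 RAND1 RAND1_alt
  have h0 : (53402397:Int) = pvG 0 := by unfold pvG pvGeom; norm_num
  conv_lhs => rw [h0]
  rw [RAND1go_closed, PySem.List.length_pyRange_one, PySem.List.pyRange_one 1 (n + 1)]
  have hlen : ((n + 1 - 1).toNat) = (n - 0).toNat := by omega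
  rw [hlen, List.map_map]
  apply List.map_congr_left
  intro k hk
  simp only [Function.comp]
  have htn : ((1:Int) + (k:Int)).toNat = k + 1 := by omega
  rw [htn, floordiv_geom]
  show pvG (0 + 1 + k) = 65539 ^ (k + 1) * 53402397 + 125654 * pvGeom (k + 1)
  unfold pvG
  have hadd : 0 + 1 + k = k + 1 := by omega
  rw [hadd]
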